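-- pv_equiv track=rewrite | github.com/pypi-data/pypi-mirror-383 | packages/filefilter/filefilter-0.1.12-py3-none-any.whl/filefilter/utilities.py | match_doublestar_segments
-- ===== SOURCE A (Python) =====
-- def match_doublestar_segments(path_parts: list[str], start: int, patt_parts: list[str]) -> list[int]:
--     """Return a list of end indices j such that path_parts[start:j] matches patt_parts where '**' means zero+ segments."""
--     results = []
--     def rec(i: int, j: int):
--         if i == len(patt_parts):
--             results.append(j)
--             return
--         token = patt_parts[i]
--         if token == '**':
--             for k in range(j, len(path_parts) + 1):
--                 rec(i + 1, k)
--         elif token == '*':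
--             if j < len(path_parts):
--                 rec(i + 1, j + 1)
--         else:
--             if j < len(path_parts) and path_parts[j] == token:
--                 rec(i + 1, j + 1)
--     rec(0, start)
--     return results
-- ===== SOURCE B (Python) =====
-- def match_doublestar_segments(path_parts: list[str], start: int, patt_parts: list[str]) -> list[int]:
--     """Iterative level-by-level version: keep the ordered frontier of current end
--     indices and advance it once per pattern token; no recursion, no append-based
--     accumulator.  Since every result sits at the same depth (the full pattern),
--     the left-to-right frontier order equals A's preorder DFS order, duplicates
--     included."""
--     n = len(path_parts)
--     frontier = [start]
--     for token in patt_parts: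
--         if token == '**':
--             frontier = [k for j in frontier for k in range(j, n + 1)]
--         elif token == '*':
--             frontier = [j + 1 for j in frontier if j < n]
--         else:
--             frontier = [j + 1 for j in frontier if j < n and path_parts[j] == token]
--     return frontier
-- ===== Notes on version B (the rewrite author's own statement) =====
-- stated objective: simpler
-- what changed: Replaces A's preorder-DFS inner recursion with appends to a mutable results list by a single iterative pass that advances an ordered frontier of end indices once per pattern token; since all results sit at full pattern depth, the frontier order equals A's DFS order, duplicates included.
-- outside the precondition, e.g. on match_doublestar_segments(['a'], -5, []): A returns [-5], B returns [-5]; on match_doublestar_segments(['a'], -5, ['a']): A raises IndexError, B raises IndexError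
import Mathlib
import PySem

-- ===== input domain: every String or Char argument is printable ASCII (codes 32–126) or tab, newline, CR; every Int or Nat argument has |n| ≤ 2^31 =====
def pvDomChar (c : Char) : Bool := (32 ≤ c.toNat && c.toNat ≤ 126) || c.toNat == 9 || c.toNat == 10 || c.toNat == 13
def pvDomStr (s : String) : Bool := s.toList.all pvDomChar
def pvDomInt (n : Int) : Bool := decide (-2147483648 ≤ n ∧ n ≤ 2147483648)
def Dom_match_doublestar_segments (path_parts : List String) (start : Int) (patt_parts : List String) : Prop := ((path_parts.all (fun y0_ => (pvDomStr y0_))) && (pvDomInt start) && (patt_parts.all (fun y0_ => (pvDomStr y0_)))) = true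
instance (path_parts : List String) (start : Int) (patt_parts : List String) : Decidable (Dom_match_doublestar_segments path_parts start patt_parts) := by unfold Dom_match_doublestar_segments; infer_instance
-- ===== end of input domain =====

-- B replaces A's preorder DFS recursion by a single iterative frontier pass over the
-- pattern tokens (simpler: no recursion, no mutable accumulator); return values only.

-- ===== PORT A =====
-- rec(i, j) of A, returning the list of indices it appends, in order.
-- The 'none' arm is where Python's patt_parts[i] would raise (unreachable: rec is
-- only ever called with i ≤ len(patt_parts)).
def pvRecA (path_parts patt_parts : List String) (i : Nat) (j : Int) : List Int :=
  if i = patt_parts.length then [j]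
  else
    match hm : patt_parts[i]? with
    | none => []
    | some token =>
      if token = "**" then
        (PySem.List.pyRange j ((path_parts.length : Int) + 1) 1).flatMap
          (fun k => pvRecA path_parts patt_parts (i + 1) k)
      else if token = "*" then
        if j < (path_parts.length : Int) then pvRecA path_parts patt_parts (i + 1) (j + 1) else []
      else
        if j < (path_parts.length : Int) ∧ PySem.List.pyGet? path_parts j = some token then
          pvRecA path_parts patt_parts (i + 1) (j + 1)
        else []
termination_by patt_parts.length - i
decreasing_by all_goals (obtain ⟨hlt, -⟩ := List.getElem?_eq_some_iff.mp hm; omega)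

def match_doublestar_segments (path_parts : List String) (start : Int) (patt_parts : List String) : List Int :=
  pvRecA path_parts patt_parts 0 start

-- ===== PORT B =====
-- one frontier step per pattern token (the three list comprehensions of Source B)
def pvStepB (path_parts : List String) (frontier : List Int) (token : String) : List Int :=
  if token = "**" then
    frontier.flatMap (fun j => PySem.List.pyRange j ((path_parts.length : Int) + 1) 1)
  else if token = "*" then
    frontier.flatMap (fun j => if j < (path_parts.length : Int) then [j + 1] else [])
  else
    frontier.flatMap (fun j =>
      if j < (path_parts.length : Int) ∧ PySem.List.pyGet? path_parts j = some token then [j + 1] else [])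

def match_doublestar_segments_alt (path_parts : List String) (start : Int) (patt_parts : List String) : List Int :=
  patt_parts.foldl (pvStepB path_parts) [start]

-- ===== PRECONDITION & SPEC =====
-- Pre_ excludes start < -len(path_parts): from such a start a literal pattern token can make
-- Python's path_parts[j] raise IndexError (both A and B raise there); on the remaining
-- excluded inputs without such a token A happens to return, identically to B.
def Pre_match_doublestar_segments (path_parts : List String) (start : Int) (patt_parts : List String) : Prop :=
  -(path_parts.length : Int) ≤ start
instance (path_parts : List String) (start : Int) (patt_parts : List String) : Decidable (Pre_match_doublestar_segments path_parts start patt_parts) := by unfold Pre_match_doublestar_segments; infer_instance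

def pvWitness_match_doublestar_segments : List String × Int × List String :=
  (["a", "b", "c"], 0, ["**", "b", "*"])

def Spec_match_doublestar_segments (path_parts : List String) (start : Int) (patt_parts : List String) (out : List Int) : Prop := out = match_doublestar_segments_alt path_parts start patt_parts
instance (path_parts : List String) (start : Int) (patt_parts : List String) (out : List Int) : Decidable (Spec_match_doublestar_segments path_parts start patt_parts out) := by unfold Spec_match_doublestar_segments; infer_instance

-- ===== CLAIM (what is proved, stated in full; the proofs are below) =====
def Claim_equal_match_doublestar_segments : Prop := ∀ (path_parts : List String) (start : Int) (patt_parts : List String), Dom_match_doublestar_segments path_parts start patt_parts → Pre_match_doublestar_segments path_parts start patt_parts → Spec_match_doublestar_segments path_parts start patt_parts (match_doublestar_segments path_parts start patt_parts)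

-- ===== LEMMAS AND PROOFS =====

theorem pvWitness_ok :
    Dom_match_doublestar_segments pvWitness_match_doublestar_segments.1
      pvWitness_match_doublestar_segments.2.1 pvWitness_match_doublestar_segments.2.2 ∧
    Pre_match_doublestar_segments pvWitness_match_doublestar_segments.1
      pvWitness_match_doublestar_segments.2.1 pvWitness_match_doublestar_segments.2.2 := by
  decide

-- folding B's step over the pattern suffix from index i computes, for each frontier
-- element j, exactly the list A's rec(i, j) appends
theorem pvFold_eq_rec (path_parts patt_parts : List String) :
    ∀ (rest : List String) (i : Nat) (fr : List Int),
      patt_parts.drop i = rest → i ≤ patt_parts.length →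
      rest.foldl (pvStepB path_parts) fr = fr.flatMap (pvRecA path_parts patt_parts i) := by
  intro rest
  induction rest with
  | nil =>
    intro i fr hdrop hle
    have hi : i = patt_parts.length := by
      have := List.drop_eq_nil_iff.mp hdrop
      omega
    have hone : ∀ j, pvRecA path_parts patt_parts i j = [j] := by
      intro j; rw [pvRecA]; simp [hi]
    rw [show pvRecA path_parts patt_parts i = fun j => ([j] : List Int) from funext hone]
    induction fr <;> simp_all
  | cons t rest' ih =>
    intro i fr hdrop hle
    have hget : patt_parts[i]? = some t := by
      have := List.head?_drop (l := patt_parts) (i := i)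
      rw [hdrop] at this
      simpa using this.symm
    have hlt : i < patt_parts.length := (List.getElem?_eq_some_iff.mp hget).1
    have hdrop' : patt_parts.drop (i + 1) = rest' := by
      have : (patt_parts.drop i).tail = patt_parts.drop (i + 1) := by
        rw [← List.drop_drop]; simp
      rw [hdrop] at this
      simpa using this.symm
    have hne : ¬ i = patt_parts.length := by omega
    have hrec : ∀ j, pvRecA path_parts patt_parts i j =
        (pvStepB path_parts [j] t).flatMap (pvRecA path_parts patt_parts (i + 1)) := by
      intro j
      rw [pvRecA]
      simp only [hne, if_false]
      split
      case _ hm => rw [hget] at hm; cases hm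
      case _ token hm =>
      rw [hget] at hm
      cases hm
      by_cases h2 : t = "**"
      · simp [pvStepB, h2]
      · by_cases h3 : t = "*"
        · simp only [h3, if_pos]
          simp [pvStepB]
          split_ifs <;> simp
        · simp only [h2, if_false, h3]
          simp [pvStepB, h3, h2]
          split_ifs <;> simp
    calc (t :: rest').foldl (pvStepB path_parts) fr
        = rest'.foldl (pvStepB path_parts) (pvStepB path_parts fr t) := by simp
      _ = (pvStepB path_parts fr t).flatMap (pvRecA path_parts patt_parts (i + 1)) :=
          ih (i + 1) _ hdrop' (by omega)
      _ = fr.flatMap (pvRecA path_parts patt_parts i) := by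
          simp only [pvStepB]
          split_ifs with h2 h3
          · rw [List.flatMap_assoc]
            refine (List.flatMap_congr ?_).symm
            intro j _
            rw [hrec j]
            simp [pvStepB, h2]
          · rw [List.flatMap_assoc]
            refine (List.flatMap_congr ?_).symm
            intro j _
            rw [hrec j]
            simp [pvStepB, h2, h3]
          · rw [List.flatMap_assoc]
            refine (List.flatMap_congr ?_).symm
            intro j _
            rw [hrec j]
            simp [pvStepB, h2, h3]

-- ===== VERDICT (by name: the statement is the Claim_ definition above) =====
theorem match_doublestar_segments_spec : Claim_equal_match_doublestar_segments := by
  intro path_parts start patt_parts _hdom _hpre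
  unfold Spec_match_doublestar_segments match_doublestar_segments match_doublestar_segments_alt
  have h := pvFold_eq_rec path_parts patt_parts patt_parts 0 [start] (by simp) (by omega)
  simp [h, List.flatMap]
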